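-- pv_equiv track=rewrite | github.com/lfmendoza/lexer-generator | src/yalex/dot.py | _format_symbol_set
-- ===== SOURCE A (Python) =====
-- def _format_symbol_set(syms: list[int]) -> str:
--     if len(syms) > 10:
--         ranges = _find_ranges(sorted(syms))
--         parts = []
--         for a, b in ranges:
--             if a == b:
--                 parts.append(_char_label(a))
--             else:
--                 parts.append(f"{_char_label(a)}-{_char_label(b)}")
--         return ",".join(parts[:5]) + ("..." if len(parts) > 5 else "")
--     return ",".join(_char_label(s) for s in sorted(syms))
--
-- def _char_label(ch: int) -> str:
--     if ch == -1:
--         return "EOF"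
--     if ch == ord("\n"):
--         return "\\n"
--     if ch == ord("\t"):
--         return "\\t"
--     if ch == ord(" "):
--         return "SP"
--     if 33 <= ch < 127:
--         c = chr(ch)
--         if c in '"\\':
--             return f"\\{c}"
--         return c
--     return f"x{ch:02x}"
--
-- def _find_ranges(sorted_ints: list[int]) -> list[tuple[int, int]]:
--     if not sorted_ints:
--         return []
--     ranges = []
--     start = sorted_ints[0]
--     end = sorted_ints[0]
--     for x in sorted_ints[1:]:
--         if x == end + 1:
--             end = x
--         else:
--             ranges.append((start, end))
--             start = x
--             end = x
--     ranges.append((start, end))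
--     return ranges
-- ===== SOURCE B (Python) =====
-- def _format_symbol_set(syms: list[int]) -> str:
--     ss = sorted(syms)
--     if len(ss) > 10:
--         # break-pair detection: a run starts at y and ends at x wherever
--         # adjacent sorted values x, y are not consecutive
--         pairs = list(zip(ss, ss[1:]))
--         starts = [ss[0]] + [y for x, y in pairs if y != x + 1]
--         ends = [x for x, y in pairs if y != x + 1] + [ss[-1]]
--         parts = [
--             _char_label(a) if a == b else f"{_char_label(a)}-{_char_label(b)}"
--             for a, b in zip(starts, ends)
--         ]
--         return ",".join(parts[:5]) + ("..." if len(parts) > 5 else "")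
--     return ",".join(_char_label(s) for s in ss)
--
-- def _char_label(ch: int) -> str:
--     if ch == -1:
--         return "EOF"
--     if ch == ord("\n"):
--         return "\\n"
--     if ch == ord("\t"):
--         return "\\t"
--     if ch == ord(" "):
--         return "SP"
--     if 33 <= ch < 127:
--         c = chr(ch)
--         if c in '"\\':
--             return f"\\{c}"
--         return c
--     return f"x{ch:02x}"
-- ===== Notes on version B (the rewrite author's own statement) =====
-- stated objective: alternative
-- what changed: Runs of consecutive values are found by break-pair detection on zip(ss, ss[1:]) (starts = first element plus each successor of a non-consecutive pair, ends = each predecessor plus the last element, ranges = zip(starts, ends)) instead of A's running start/end scan with mutable state.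
import Mathlib
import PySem

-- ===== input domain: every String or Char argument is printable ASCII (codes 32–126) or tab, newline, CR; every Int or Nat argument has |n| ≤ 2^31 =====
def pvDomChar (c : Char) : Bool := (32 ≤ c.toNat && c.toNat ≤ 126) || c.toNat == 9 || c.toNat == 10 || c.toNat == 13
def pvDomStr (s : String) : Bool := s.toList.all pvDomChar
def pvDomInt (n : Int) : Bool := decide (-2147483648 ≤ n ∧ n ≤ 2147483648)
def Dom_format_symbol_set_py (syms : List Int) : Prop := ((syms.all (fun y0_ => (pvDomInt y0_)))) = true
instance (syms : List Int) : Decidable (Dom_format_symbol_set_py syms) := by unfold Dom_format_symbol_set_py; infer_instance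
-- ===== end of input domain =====

-- B replaces A's running start/end scan by break-pair detection on zip(ss, ss[1:]) (objective: alternative, same cost).

-- ===== PORT A =====
-- shared helper _char_label (identical in both Python sources)
-- hex digits of n, most significant first ([] for 0); exact for f"{n:x}" digits
def pvHexDigit (n : Nat) : Char := if n < 10 then Char.ofNat (48 + n) else Char.ofNat (87 + n)

def pvHexDigits (n : Nat) : List Char :=
  if n = 0 then [] else pvHexDigits (n / 16) ++ [pvHexDigit (n % 16)]
decreasing_by exact Nat.div_lt_self (Nat.pos_of_ne_zero (by assumption)) (by norm_num)

-- f"{ch:02x}": lowercase hex, '-' sign for negatives, zero-padded to total width 2 (exact for any int)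
def pvHex02 (ch : Int) : List Char :=
  if ch < 0 then '-' :: (if ch.natAbs = 0 then ['0'] else pvHexDigits ch.natAbs)
  else
    let d := if ch.toNat = 0 then ['0'] else pvHexDigits ch.toNat
    if d.length < 2 then List.replicate (2 - d.length) '0' ++ d else d

-- _char_label; Python's `c in '"\\'` is the two-character test below
def charLabel (ch : Int) : String :=
  if ch = -1 then "EOF"
  else if ch = 10 then "\\n"
  else if ch = 9 then "\\t"
  else if ch = 32 then "SP"
  else if 33 ≤ ch ∧ ch < 127 then
    let c := Char.ofNat ch.toNat
    if c = '"' ∨ c = '\\' then String.ofList ['\\', c] else String.ofList [c]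
  else String.ofList ('x' :: pvHex02 ch)

-- _find_ranges's for-loop over sorted_ints[1:] with state (start, end, ranges)
def findRangesLoop (rest : List Int) (start e : Int) (ranges : List (Int × Int)) : List (Int × Int) :=
  match rest with
  | [] => ranges ++ [(start, e)]
  | x :: xs =>
      if x = e + 1 then findRangesLoop xs start x ranges
      else findRangesLoop xs x x (ranges ++ [(start, e)])

def findRanges (sorted_ints : List Int) : List (Int × Int) :=
  match sorted_ints with
  | [] => []
  | h :: t => findRangesLoop t h h []

def format_symbol_set_py (syms : List Int) : String :=
  if syms.length > 10 then
    let ranges := findRanges (PySem.List.sorted syms (fun x => x) false)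
    let parts := ranges.map (fun ab =>
      if ab.1 = ab.2 then charLabel ab.1 else charLabel ab.1 ++ "-" ++ charLabel ab.2)
    PySem.Str.join "," (parts.take 5) ++ (if parts.length > 5 then "..." else "")
  else
    PySem.Str.join "," ((PySem.List.sorted syms (fun x => x) false).map charLabel)

-- ===== PORT B =====
def format_symbol_set_py_alt (syms : List Int) : String :=
  let ss := PySem.List.sorted syms (fun x => x) false
  if ss.length > 10 then
    let pairs := ss.zip (ss.drop 1)       -- zip(ss, ss[1:])
    let starts := PySem.List.pyGetD ss 0 0 ::
      pairs.filterMap (fun xy => if xy.2 ≠ xy.1 + 1 then some xy.2 else none)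
    let ends :=
      pairs.filterMap (fun xy => if xy.2 ≠ xy.1 + 1 then some xy.1 else none) ++
      [PySem.List.pyGetD ss (-1) 0]
    let parts := (starts.zip ends).map (fun ab =>
      if ab.1 = ab.2 then charLabel ab.1 else charLabel ab.1 ++ "-" ++ charLabel ab.2)
    PySem.Str.join "," (parts.take 5) ++ (if parts.length > 5 then "..." else "")
  else
    PySem.Str.join "," (ss.map charLabel)

-- ===== PRECONDITION & SPEC =====
def Spec_format_symbol_set_py (syms : List Int) (out : String) : Prop := out = format_symbol_set_py_alt syms
instance (syms : List Int) (out : String) : Decidable (Spec_format_symbol_set_py syms out) := by unfold Spec_format_symbol_set_py; infer_instance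

-- ===== CLAIM (what is proved, stated in full; the proofs are below) =====
def Claim_equal_format_symbol_set_py : Prop := ∀ (syms : List Int), Dom_format_symbol_set_py syms → Spec_format_symbol_set_py syms (format_symbol_set_py syms)

-- ===== LEMMAS AND PROOFS =====

-- clean recursive characterisation of A's loop
def runsFrom (s e : Int) : List Int → List (Int × Int)
  | [] => [(s, e)]
  | x :: xs => if x = e + 1 then runsFrom s x xs else (s, e) :: runsFrom x x xs

theorem findRangesLoop_eq (rest : List Int) :
    ∀ s e acc, findRangesLoop rest s e acc = acc ++ runsFrom s e rest := by
  induction rest with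
  | nil => intro s e acc; simp [findRangesLoop, runsFrom]
  | cons x xs ih =>
      intro s e acc
      simp only [findRangesLoop, runsFrom]
      split_ifs with h
      · exact ih s x acc
      · rw [ih x x (acc ++ [(s, e)])]; simp

-- the start of the first run is the passed-in `s`; everything else ignores it
theorem runsFrom_start (t : List Int) :
    ∀ s s' e, ∃ b r, runsFrom s e t = (s, b) :: r ∧ runsFrom s' e t = (s', b) :: r := by
  induction t with
  | nil => intro s s' e; exact ⟨e, [], rfl, rfl⟩
  | cons x xs ih =>
      intro s s' e
      simp only [runsFrom]
      split_ifs with h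
      · exact ih s s' x
      · exact ⟨e, runsFrom x x xs, rfl, rfl⟩

-- B's break-pair construction computes the same runs
theorem zip_breaks_eq (t : List Int) :
    ∀ h : Int,
      (h :: ((h :: t).zip t).filterMap (fun xy => if xy.2 ≠ xy.1 + 1 then some xy.2 else none)).zip
        (((h :: t).zip t).filterMap (fun xy => if xy.2 ≠ xy.1 + 1 then some xy.1 else none) ++
          [(h :: t).getLast (by simp)]) = runsFrom h h t := by
  induction t with
  | nil => intro h; simp [runsFrom]
  | cons y rest ih =>
      intro h
      have ihy := ih y
      have hlast : (h :: y :: rest).getLast (by simp) = (y :: rest).getLast (by simp) := by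
        simp [List.getLast_cons]
      simp only [List.zip_cons_cons, List.filterMap_cons, hlast]
      by_cases hc : y = h + 1
      · -- consecutive: the pair (h, y) contributes no break; the first run extends
        simp only [if_neg (not_not_intro hc)]
        rw [show runsFrom h h (y :: rest) = runsFrom h y rest from by
          simp [runsFrom, if_pos hc]]
        obtain ⟨b, r, h1, h2⟩ := runsFrom_start rest h y y
        rw [h2] at ihy
        rcases cE : (((y :: rest).zip rest).filterMap
            (fun xy => if xy.2 ≠ xy.1 + 1 then some xy.1 else none) ++
            [(y :: rest).getLast (by simp)]) with _ | ⟨e0, E⟩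
        · exact absurd cE (by simp)
        · rw [cE] at ihy
          simp only [List.zip_cons_cons, List.cons.injEq, Prod.mk.injEq] at ihy
          rw [h1]
          simp only [List.zip_cons_cons, List.cons.injEq, Prod.mk.injEq]
          exact ihy
      · -- break between h and y: (h, h) is a complete run
        rw [if_pos (by exact hc), if_pos (by exact hc)]
        simp only [List.cons_append, List.zip_cons_cons, runsFrom, if_neg (by omega : ¬ y = h + 1)]
        rw [ihy]

theorem ranges_agree (h : Int) (t : List Int) :
    findRanges (h :: t) =
      (PySem.List.pyGetD (h :: t) 0 0 ::
        ((h :: t).zip ((h :: t).drop 1)).filterMap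
          (fun xy => if xy.2 ≠ xy.1 + 1 then some xy.2 else none)).zip
      (((h :: t).zip ((h :: t).drop 1)).filterMap
          (fun xy => if xy.2 ≠ xy.1 + 1 then some xy.1 else none) ++
        [PySem.List.pyGetD (h :: t) (-1) 0]) := by
  rw [PySem.List.pyGetD_zero_cons, PySem.List.pyGetD_neg_one (h :: t) 0 (by simp)]
  simp only [List.drop_one, List.tail_cons]
  rw [zip_breaks_eq t h]
  simp [findRanges, findRangesLoop_eq]

-- ===== VERDICT (by name: the statement is the Claim_ definition above) =====
theorem format_symbol_set_py_spec : Claim_equal_format_symbol_set_py := by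
  intro syms _
  unfold Spec_format_symbol_set_py format_symbol_set_py format_symbol_set_py_alt
  rw [show syms.length = (PySem.List.sorted syms (fun x => x) false).length from
    (PySem.List.length_sorted syms (fun x => x) false).symm]
  by_cases hlen : (PySem.List.sorted syms (fun x => x) false).length > 10
  · rw [if_pos hlen, if_pos hlen]
    rcases hss : PySem.List.sorted syms (fun x => x) false with _ | ⟨h, t⟩
    · rw [hss] at hlen; simp at hlen
    · rw [hss] at *
      rw [ranges_agree h t]
  · rw [if_neg hlen, if_neg hlen]
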